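-- pv_equiv track=rewrite | github.com/BelfodilAimene/CbOImplications | complexData.py | get_items_from_hmt_item
-- ===== SOURCE A (Python) =====
-- def get_items_from_hmt_item(hmt_item):
--     if len(hmt_item)==0:
--         return []
--     splitted = hmt_item.split(".")
--     prefix = splitted[0]
--     result = [prefix]
--     for element in splitted[1:]:
--         prefix+="."+element
--         result.append(prefix)
--     return result
-- ===== SOURCE B (Python) =====
-- def get_items_from_hmt_item(hmt_item):
--     if len(hmt_item) == 0:
--         return []
--     result = [hmt_item[:i] for i, c in enumerate(hmt_item) if c == '.']
--     result.append(hmt_item)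
--     return result
-- ===== Notes on version B (the rewrite author's own statement) =====
-- stated objective: alternative
-- what changed: Instead of splitting the string on the dot separator and rebuilding each prefix with a running string accumulator, B makes a single enumerate pass over the original string, emitting the slice up to each dot position and finally the whole string, never constructing a split list or re-joining pieces.
import Mathlib
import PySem

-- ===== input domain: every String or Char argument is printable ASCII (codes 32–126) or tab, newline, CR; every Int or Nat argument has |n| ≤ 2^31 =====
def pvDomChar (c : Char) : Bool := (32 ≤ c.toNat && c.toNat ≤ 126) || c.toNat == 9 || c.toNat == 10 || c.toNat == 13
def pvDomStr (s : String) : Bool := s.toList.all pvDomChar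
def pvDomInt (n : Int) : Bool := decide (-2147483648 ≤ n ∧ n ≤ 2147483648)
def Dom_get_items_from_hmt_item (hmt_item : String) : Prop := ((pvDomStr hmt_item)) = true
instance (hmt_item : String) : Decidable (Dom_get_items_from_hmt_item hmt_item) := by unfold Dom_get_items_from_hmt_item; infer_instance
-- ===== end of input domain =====

-- B replaces A's split-and-rejoin accumulator with a single scan for dot positions emitting
-- hmt_item[:i] at each dot plus the whole string (alternative decomposition, same result).

-- ===== PORT A =====
-- A: guard on empty, split on ".", then fold over the tail pieces extending a running prefix.
def get_items_from_hmt_item (hmt_item : String) : List String :=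
  if PySem.Str.len hmt_item == 0 then []
  else
    match PySem.Chars.split? hmt_item.toList ['.'] with
    | none => []          -- unreachable: the separator "." is nonempty
    | some [] => []       -- unreachable: split always returns at least one piece (splitted[0] exists)
    | some (p0 :: rest) =>
      let fin := rest.foldl
        (fun (st : List Char × List (List Char)) element =>
          let p := st.1 ++ '.' :: element
          (p, st.2 ++ [p]))
        (p0, [p0])
      fin.2.map String.ofList

-- ===== PORT B =====
-- B: guard on empty, then one pass: at every index i holding '.', emit hmt_item[:i]; finally the whole string.
def get_items_from_hmt_item_alt (hmt_item : String) : List String :=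
  if PySem.Str.len hmt_item == 0 then []
  else
    let cs := hmt_item.toList
    ((PySem.List.enumerate cs).filterMap
      (fun p => if p.2 == '.' then some (String.ofList (PySem.List.slice cs none (some p.1))) else none))
    ++ [hmt_item]

-- ===== PRECONDITION & SPEC =====
def Spec_get_items_from_hmt_item (hmt_item : String) (out : List String) : Prop := out = get_items_from_hmt_item_alt hmt_item
instance (hmt_item : String) (out : List String) : Decidable (Spec_get_items_from_hmt_item hmt_item out) := by unfold Spec_get_items_from_hmt_item; infer_instance

-- ===== CLAIM (what is proved, stated in full; the proofs are below) =====
def Claim_equal_get_items_from_hmt_item : Prop := ∀ (hmt_item : String), Dom_get_items_from_hmt_item hmt_item → Spec_get_items_from_hmt_item hmt_item (get_items_from_hmt_item hmt_item)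

-- ===== LEMMAS AND PROOFS =====

-- structural spec of splitOn on the single-dot separator
def pvSos : List Char → List (List Char)
  | [] => [[]]
  | c :: cs => if c = '.' then [] :: pvSos cs else (pvSos cs).modifyHead (c :: ·)

-- dot prefixes of cs (without the final full string)
def pvDots : List Char → List (List Char)
  | [] => []
  | c :: cs => (if c = '.' then [[]] else []) ++ (pvDots cs).map (c :: ·)

-- tail of A's cumulative fold, as a structural recursion
def pvCumTail (p : List Char) : List (List Char) → List (List Char)
  | [] => []
  | e :: es => (p ++ '.' :: e) :: pvCumTail (p ++ '.' :: e) es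

lemma pvSos_ne_nil (cs : List Char) : pvSos cs ≠ [] := by
  cases cs with
  | nil => simp [pvSos]
  | cons c cs =>
    simp only [pvSos]
    split
    · simp
    · cases h : pvSos cs with
      | nil => exact absurd h (pvSos_ne_nil cs)
      | cons a l => simp [List.modifyHead]

lemma go_eq_sos (l : List Char) : ∀ (fuel : Nat) (cur : List Char) (acc : List (List Char)),
    l.length ≤ fuel →
    PySem.Chars.splitOn.go ['.'] fuel l cur acc
      = acc.reverse ++ (pvSos l).modifyHead (cur.reverse ++ ·) := by
  induction l with
  | nil =>
    intro fuel cur acc _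
    cases fuel <;> rw [PySem.Chars.splitOn.go] <;> simp [pvSos, List.modifyHead]
  | cons c cs ih =>
    intro fuel cur acc hf
    cases fuel with
    | zero => simp at hf
    | succ n =>
      have hn : cs.length ≤ n := by simpa using hf
      rw [PySem.Chars.splitOn.go]
      by_cases hc : c = '.'
      · subst hc
        have hpre : ['.'].isPrefixOf ('.' :: cs) = true := by simp [List.isPrefixOf]
        rw [if_pos hpre]
        simp only [List.length_cons, List.length_nil, List.drop_succ_cons, List.drop_zero]
        rw [ih n [] (List.reverse cur :: acc) hn]
        rw [show pvSos ('.' :: cs) = [] :: pvSos cs from by rw [pvSos, if_pos rfl]]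
        cases h : pvSos cs with
        | nil => exact absurd h (pvSos_ne_nil cs)
        | cons a l => simp [List.modifyHead]
      · have hpre : ['.'].isPrefixOf (c :: cs) = false := by
          simp [List.isPrefixOf, Ne.symm hc]
        rw [if_neg (by simp [hpre])]
        rw [ih n (c :: cur) acc hn]
        simp only [pvSos, if_neg hc]
        cases h : pvSos cs with
        | nil => exact absurd h (pvSos_ne_nil cs)
        | cons a l => simp [List.modifyHead]

lemma splitOn_eq_sos (cs : List Char) : PySem.Chars.splitOn cs ['.'] = pvSos cs := by
  unfold PySem.Chars.splitOn
  rw [go_eq_sos cs (cs.length + 1) [] [] (by omega)]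
  cases h : pvSos cs with
  | nil => exact absurd h (pvSos_ne_nil cs)
  | cons a l => simp [List.modifyHead]

lemma pvCumTail_cons (x : Char) (p : List Char) (es : List (List Char)) :
    pvCumTail (x :: p) es = (pvCumTail p es).map (x :: ·) := by
  induction es generalizing p with
  | nil => simp [pvCumTail]
  | cons e es ih => simp [pvCumTail, ih]

-- A's cumulative list over the split pieces is exactly the dot-prefixes plus the full string
lemma sos_cum (cs : List Char) : ∀ p0 rest, pvSos cs = p0 :: rest →
    pvDots cs ++ [cs] = p0 :: pvCumTail p0 rest := by
  induction cs with
  | nil =>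
    intro p0 rest h
    simp only [pvSos, List.cons.injEq] at h
    obtain ⟨h1, h2⟩ := h
    subst h1; subst h2
    simp [pvDots, pvCumTail]
  | cons c cs ih =>
    intro p0 rest h
    obtain ⟨q0, qs, hq⟩ : ∃ q0 qs, pvSos cs = q0 :: qs := by
      cases h' : pvSos cs with
      | nil => exact absurd h' (pvSos_ne_nil cs)
      | cons a l => exact ⟨a, l, rfl⟩
    have ihq := ih q0 qs hq
    have ihmap : ∀ x : Char,
        (pvDots cs).map (x :: ·) ++ [x :: cs] = (x :: q0) :: (pvCumTail q0 qs).map (x :: ·) := by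
      intro x
      have : (pvDots cs ++ [cs]).map (x :: ·) = (q0 :: pvCumTail q0 qs).map (x :: ·) := by rw [ihq]
      simpa using this
    by_cases hc : c = '.'
    · subst hc
      rw [pvSos, if_pos rfl, hq] at h
      injection h with h1 h2
      subst h1; subst h2
      rw [show pvDots ('.' :: cs) = [[]] ++ (pvDots cs).map ('.' :: ·) from by
        rw [pvDots, if_pos rfl]]
      rw [pvCumTail]
      simp only [List.nil_append, List.cons_append]
      rw [pvCumTail_cons]
      exact congrArg (List.cons ([] : List Char)) (ihmap '.')
    · rw [pvSos, if_neg hc, hq] at h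
      simp only [List.modifyHead] at h
      injection h with h1 h2
      subst h1; subst h2
      simp only [pvDots, if_neg hc, List.nil_append]
      rw [pvCumTail_cons]
      exact ihmap c

-- A's foldl computes pvCumTail in its second component
lemma foldl_cum (es : List (List Char)) : ∀ (p : List Char) (acc : List (List Char)),
    (es.foldl (fun (st : List Char × List (List Char)) element =>
        (st.1 ++ '.' :: element, st.2 ++ [st.1 ++ '.' :: element])) (p, acc)).2
      = acc ++ pvCumTail p es := by
  induction es with
  | nil => intro p acc; simp [pvCumTail]
  | cons e es ih =>
    intro p acc
    rw [List.foldl_cons]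
    show (es.foldl (fun (st : List Char × List (List Char)) element =>
        (st.1 ++ '.' :: element, st.2 ++ [st.1 ++ '.' :: element]))
        (p ++ '.' :: e, acc ++ [p ++ '.' :: e])).2 = acc ++ pvCumTail p (e :: es)
    rw [ih]
    simp [pvCumTail]

-- B's filterMap over enumerate computes the dot prefixes (generalized over a consumed prefix)
lemma enum_dots (cs : List Char) : ∀ (pre : List Char),
    (PySem.List.enumerate cs ((pre.length : Int))).filterMap
        (fun p => if p.2 == '.' then some (String.ofList (PySem.List.slice (pre ++ cs) none (some p.1))) else none)
      = ((pvDots cs).map (pre ++ ·)).map String.ofList := by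
  induction cs with
  | nil => intro pre; simp [PySem.List.enumerate_nil, pvDots]
  | cons c cs ih =>
    intro pre
    rw [PySem.List.enumerate_cons, List.filterMap_cons]
    have hsl : PySem.List.slice (pre ++ c :: cs) none (some ((pre.length : Int))) = pre := by
      rw [PySem.List.slice_to (pre ++ c :: cs) (by positivity)]
      simp
    have ihc := ih (pre ++ [c])
    rw [show ((pre ++ [c]).length : Int) = (pre.length : Int) + 1 by simp] at ihc
    rw [show (pre ++ [c]) ++ cs = pre ++ c :: cs by simp] at ihc
    by_cases hc : c = '.'
    · subst hc
      simp only [beq_self_eq_true, if_pos]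
      rw [hsl, ihc]
      simp [pvDots, Function.comp_def]
    · rw [if_neg (by simp [hc])]
      rw [ihc]
      simp [pvDots, hc, Function.comp_def]

-- ===== VERDICT (by name: the statement is the Claim_ definition above) =====
theorem get_items_from_hmt_item_spec : Claim_equal_get_items_from_hmt_item := by
  intro s _
  unfold Spec_get_items_from_hmt_item get_items_from_hmt_item get_items_from_hmt_item_alt
  by_cases hs : s = ""
  · simp [hs, PySem.Str.len]
  · have hcs : s.toList ≠ [] := by simpa using hs
    have hlen : (PySem.Str.len s == 0) = false := by simpa using hs
    rw [hlen]
    simp only [Bool.false_eq_true, if_neg, not_false_iff]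
    rw [PySem.Chars.split?]
    rw [if_neg (by simp)]
    rw [splitOn_eq_sos]
    obtain ⟨p0, rest, hq⟩ : ∃ p0 rest, pvSos s.toList = p0 :: rest := by
      cases h' : pvSos s.toList with
      | nil => exact absurd h' (pvSos_ne_nil s.toList)
      | cons a l => exact ⟨a, l, rfl⟩
    rw [hq]
    simp only []
    rw [foldl_cum]
    have henum := enum_dots s.toList []
    simp only [List.length_nil, Nat.cast_zero, List.nil_append, List.map_id'] at henum
    rw [henum]
    have hmain := sos_cum s.toList p0 rest hq
    have hmaps : (pvDots s.toList).map String.ofList ++ [String.ofList s.toList]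
        = String.ofList p0 :: (pvCumTail p0 rest).map String.ofList := by
      have : (pvDots s.toList ++ [s.toList]).map String.ofList
          = (p0 :: pvCumTail p0 rest).map String.ofList := by rw [hmain]
      simpa using this
    rw [String.ofList_toList] at hmaps
    simp [hmaps]
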